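-- pv_equiv track=rewrite | github.com/AlvaroPenaRuiz/AdventOfCode2023 | 01/main.py | decrypt_line
-- ===== SOURCE A (Python) =====
-- def decrypt_line(line: str):
--     first = None
--     last = None
--
--     for char in line:
--         if char.isnumeric():
--             last = char
--             if not first:
--                 first = char
--
--     return f"{first}{last}"
-- ===== SOURCE B (Python) =====
-- def decrypt_line(line: str):
--     first = None
--     for ch in line:
--         if ch.isnumeric():
--             first = ch
--             break
--     last = None
--     for ch in reversed(line):
--         if ch.isnumeric():
--             last = ch
--             break
--     return f"{first}{last}"
-- ===== Notes on version B (the rewrite author's own statement) =====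
-- stated objective: alternative
-- what changed: Instead of one full pass threading a coupled (first,last) state with an inner truthiness check, B does two independent first-match scans (front-to-back for first, back-to-front for last), each stopping at the first digit; digitless lines get the same None-formatted result.
import Mathlib
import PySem

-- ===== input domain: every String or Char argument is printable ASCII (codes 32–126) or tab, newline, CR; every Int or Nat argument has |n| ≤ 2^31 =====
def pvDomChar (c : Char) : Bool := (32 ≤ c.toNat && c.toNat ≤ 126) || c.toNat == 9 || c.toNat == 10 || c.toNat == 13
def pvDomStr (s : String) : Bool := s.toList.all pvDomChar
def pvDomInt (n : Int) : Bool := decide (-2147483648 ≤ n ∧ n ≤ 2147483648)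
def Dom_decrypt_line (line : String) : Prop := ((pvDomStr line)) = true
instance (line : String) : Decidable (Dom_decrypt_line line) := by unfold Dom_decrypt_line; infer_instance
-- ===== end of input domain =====

-- B replaces A's single pass with a coupled (first,last) state by two independent
-- first-match scans: front-to-back for the first digit, back-to-front for the last.


-- shared formatter for the f-string: None → "None", a char → itself
def pvFmtOpt (o : Option Char) : String :=
  match o with
  | none => "None"
  | some c => String.mk [c]

-- ===== PORT A =====
-- one pass over the characters; `if not first` is `p.1 = none` since a digit char is truthy
def decrypt_line (line : String) : String :=
  let st := line.toList.foldl
    (fun (p : Option Char × Option Char) c =>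
      if PySem.Chars.isdigit c then
        ((if p.1.isNone then some c else p.1), some c)
      else p)
    (none, none)
  pvFmtOpt st.1 ++ pvFmtOpt st.2

-- ===== PORT B =====
-- two break-at-first-match loops = List.find? on the list and on its reverse
def decrypt_line_alt (line : String) : String :=
  let first := line.toList.find? (fun c => PySem.Chars.isdigit c)
  let last := line.toList.reverse.find? (fun c => PySem.Chars.isdigit c)
  pvFmtOpt first ++ pvFmtOpt last

-- ===== PRECONDITION & SPEC =====
def Spec_decrypt_line (line : String) (out : String) : Prop := out = decrypt_line_alt line
instance (line : String) (out : String) : Decidable (Spec_decrypt_line line out) := by unfold Spec_decrypt_line; infer_instance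

-- ===== CLAIM (what is proved, stated in full; the proofs are below) =====
def Claim_equal_decrypt_line : Prop := ∀ (line : String), Dom_decrypt_line line → Spec_decrypt_line line (decrypt_line line)

-- ===== LEMMAS AND PROOFS =====

-- A's fold, started from any state, is the two first-match searches merged with Option.or
theorem pv_fold_char (l : List Char) (f s : Option Char) :
    l.foldl
      (fun (p : Option Char × Option Char) c =>
        if PySem.Chars.isdigit c then
          ((if p.1.isNone then some c else p.1), some c)
        else p)
      (f, s)
    = (f.or (l.find? (fun c => PySem.Chars.isdigit c)),
       (l.reverse.find? (fun c => PySem.Chars.isdigit c)).or s) := by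
  induction l generalizing f s with
  | nil => simp
  | cons c t ih =>
    by_cases h : PySem.Chars.isdigit c = true
    · simp only [List.foldl_cons, h, if_pos, List.reverse_cons, List.find?_append,
        List.find?_cons, ih]
      cases f <;> cases t.reverse.find? (fun c => PySem.Chars.isdigit c) <;>
        simp [Option.or, Option.isNone]
    · simp only [List.foldl_cons, h, List.reverse_cons, List.find?_append,
        List.find?_cons, ih, Bool.false_eq_true]
      cases t.reverse.find? (fun c => PySem.Chars.isdigit c) <;> simp [Option.or]

-- ===== VERDICT (by name: the statement is the Claim_ definition above) =====
theorem decrypt_line_spec : Claim_equal_decrypt_line := by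
  intro line _
  unfold Spec_decrypt_line decrypt_line decrypt_line_alt
  simp only [pv_fold_char]
  cases line.toList.reverse.find? (fun c => PySem.Chars.isdigit c) <;>
    simp [Option.or]
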